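-- pv_equiv track=rewrite | github.com/oyssolbo/anafi-mission-planning | waypoints_generator/waypoints_generator/search_pattern.py | spiral_explore
-- ===== SOURCE A (Python) =====
-- from queue import PriorityQueue
--
-- def spiral_explore(distances):
-- 	n = len(distances)
-- 	m = len(distances[0])
-- 	visited = [[False for _ in range(m)] for __ in range(n)]
-- 	start = (n//2, m//2)
-- 	q = PriorityQueue()
-- 	q.put((0, start))
-- 	while not q.empty():
-- 		curr_dist, curr = q.get()
-- 		if visited[curr[0]][curr[1]]:
-- 			continue
-- 		visited[curr[0]][curr[1]] = True
-- 		x, y = curr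
-- 		neighbors = [(x+1, y), (x-1, y), (x, y+1), (x, y-1)]
-- 		for neighbor in neighbors:
-- 			if 0 <= neighbor[0] < n and 0 <= neighbor[1] < m:
-- 				q.put((curr_dist + distances[neighbor[0]][neighbor[1]], neighbor))
-- 	return visited
-- ===== SOURCE B (Python) =====
-- def spiral_explore(distances):
--     # Every grid cell is reachable from the center by 4-neighbor steps,
--     # so the Dijkstra-style sweep in A marks every cell: return the full grid.
--     return [[True] * len(distances[0]) for _ in distances]
-- ===== Notes on version B (the rewrite author's own statement) =====
-- stated objective: faster
-- what changed: A runs a Dijkstra-style priority-queue sweep from the center cell; since the 4-neighbor grid is fully connected, every cell is always marked, so B returns the full all-True n x m grid directly with no queue at all.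
import Mathlib
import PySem

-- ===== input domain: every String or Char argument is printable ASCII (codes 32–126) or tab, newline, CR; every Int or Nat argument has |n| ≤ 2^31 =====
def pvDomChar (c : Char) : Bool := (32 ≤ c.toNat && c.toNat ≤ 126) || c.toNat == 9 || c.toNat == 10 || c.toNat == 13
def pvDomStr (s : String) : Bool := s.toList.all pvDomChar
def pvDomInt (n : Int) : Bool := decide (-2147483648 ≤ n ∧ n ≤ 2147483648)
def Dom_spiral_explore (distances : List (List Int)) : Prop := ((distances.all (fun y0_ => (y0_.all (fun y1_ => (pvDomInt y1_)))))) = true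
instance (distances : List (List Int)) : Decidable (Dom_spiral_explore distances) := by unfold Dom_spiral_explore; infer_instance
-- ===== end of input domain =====

-- B replaces A's priority-queue sweep by returning the full all-True grid directly (faster; the sweep always marks every cell).

-- ===== PORT A =====
-- nested read visited[x][y] / distances[x][y] (Python raises where this is none)
def pyGet2 {α : Type} (v : List (List α)) (x y : Int) : Option α :=
  (PySem.List.pyGet? v x).bind fun r => PySem.List.pyGet? r y

-- visited[x][y] = True (only applied after a successful read, as in A)
def pySet2 (v : List (List Bool)) (x y : Int) : List (List Bool) :=
  PySem.List.pySetD v x (PySem.List.pySetD (PySem.List.pyGetD v x []) y true)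

-- lexicographic ≤ on PriorityQueue entries (dist, (x, y)) — Python tuple order
def tripLe (a b : Int × Int × Int) : Bool :=
  if a.1 ≠ b.1 then a.1 < b.1
  else if a.2.1 ≠ b.2.1 then a.2.1 < b.2.1
  else a.2.2 ≤ b.2.2

-- q.get(): remove and return the smallest entry (PriorityQueue)
def popMin : List (Int × Int × Int) → Option ((Int × Int × Int) × List (Int × Int × Int))
  | [] => none
  | t :: ts =>
    match popMin ts with
    | none => some (t, [])
    | some (mn, r) => if tripLe t mn then some (t, ts) else some (mn, t :: r)

-- number of False cells, the termination measure of the while-loop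
def unvis (v : List (List Bool)) : Nat := (v.map (fun r => r.count false)).sum

theorem popMin_none (q : List (Int × Int × Int)) (h : popMin q = none) : q = [] := by
  cases q with
  | nil => rfl
  | cons a ts =>
    cases hp : popMin ts with
    | none => simp [popMin, hp] at h
    | some p =>
      obtain ⟨mn, rr⟩ := p
      simp only [popMin, hp] at h
      split at h <;> simp at h

theorem popMin_perm : ∀ (q : List (Int × Int × Int)) t r, popMin q = some (t, r) → q.Perm (t :: r) := by
  intro q
  induction q with
  | nil => intro t r h; simp [popMin] at h
  | cons a ts ih =>
    intro t r h
    cases hp : popMin ts with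
    | none =>
      have hts : ts = [] := popMin_none ts hp
      subst hts
      simp [popMin] at h
      obtain ⟨h1, h2⟩ := h; subst h1; subst h2
      exact List.Perm.refl _
    | some p =>
      obtain ⟨mn, rr⟩ := p
      simp only [popMin, hp] at h
      by_cases hle : tripLe a mn = true
      · simp [hle] at h; obtain ⟨h1, h2⟩ := h; subst h1; subst h2; exact List.Perm.refl _
      · simp [hle] at h; obtain ⟨h1, h2⟩ := h; subst h1; subst h2
        exact (List.Perm.cons a (ih mn rr hp)).trans (List.Perm.swap mn a rr)

theorem popMin_length (q : List (Int × Int × Int)) (t : Int × Int × Int)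
    (r : List (Int × Int × Int)) (h : popMin q = some (t, r)) : r.length + 1 = q.length := by
  have := (popMin_perm q t r h).length_eq
  simpa using this.symm

theorem count_set_true : ∀ (r : List Bool) (k : Nat), r[k]? = some false →
    (r.set k true).count false + 1 = r.count false := by
  intro r
  induction r with
  | nil => intro k h; simp at h
  | cons b tb ih =>
    intro k h
    cases k with
    | zero => simp_all
    | succ k =>
      simp only [List.getElem?_cons_succ] at h
      have h2 := ih k h
      cases b <;> simp <;> omega

theorem unvis_set_lt : ∀ (v : List (List Bool)) (j : Nat) (r : List Bool) (k : Nat),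
    v[j]? = some r → r[k]? = some false → unvis (v.set j (r.set k true)) < unvis v := by
  intro v
  induction v with
  | nil => intro j r k h; simp at h
  | cons a tv ih =>
    intro j r k h hk
    cases j with
    | zero =>
      simp only [List.getElem?_cons_zero, Option.some.injEq] at h
      subst h
      have := count_set_true a k hk
      simp [unvis]; omega
    | succ j =>
      simp only [List.getElem?_cons_succ] at h
      have := ih j r k h hk
      simp [unvis] at this ⊢; omega

theorem unvis_pySet2_lt (v : List (List Bool)) (x y : Int)
    (h : pyGet2 v x y = some false) : unvis (pySet2 v x y) < unvis v := by
  unfold pyGet2 at h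
  cases hg : PySem.List.pyGet? v x with
  | none => rw [hg] at h; simp at h
  | some r =>
    rw [hg] at h
    simp only [Option.bind_some] at h
    unfold PySem.List.pyGet? at hg h
    cases hj : PySem.List.pyIdx? v.length x with
    | none => rw [hj] at hg; simp at hg
    | some j =>
      rw [hj] at hg
      simp only [Option.bind_some] at hg
      cases hk : PySem.List.pyIdx? r.length y with
      | none => rw [hk] at h; simp at h
      | some k =>
        rw [hk] at h
        simp only [Option.bind_some] at h
        have hr : PySem.List.pyGetD v x [] = r := by
          simp [PySem.List.pyGetD, PySem.List.pyGet?, hj, hg]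
        have hset : pySet2 v x y = v.set j (r.set k true) := by
          unfold pySet2
          rw [hr]
          simp [PySem.List.pySetD, PySem.List.pySet?, hj, hk]
        rw [hset]
        exact unvis_set_lt v j r k hg h

-- port of A's while-loop over the PriorityQueue
def loopA (n m : Int) (distances : List (List Int)) (visited : List (List Bool))
    (q : List (Int × Int × Int)) : List (List Bool) :=
  match hq : popMin q with
  | none => visited
  | some ((d, x, y), q') =>
    match hv : pyGet2 visited x y with
    | none => visited          -- Python raises here (excluded by Pre_)
    | some true => loopA n m distances visited q'
    | some false =>
      let visited' := pySet2 visited x y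
      let q'' := [(x+1, y), (x-1, y), (x, y+1), (x, y-1)].foldl (fun acc p =>
          if 0 ≤ p.1 ∧ p.1 < n ∧ 0 ≤ p.2 ∧ p.2 < m then
            match pyGet2 distances p.1 p.2 with
            | some w => acc ++ [(d + w, p.1, p.2)]
            | none => acc      -- Python raises here (excluded by Pre_)
          else acc) q'
      loopA n m distances visited' q''
termination_by (unvis visited, q.length)
decreasing_by
  · apply Prod.Lex.right
    have := popMin_length q (d, x, y) q' hq
    omega
  · exact Prod.Lex.left _ _ (unvis_pySet2_lt visited x y hv)

def spiral_explore (distances : List (List Int)) : List (List Bool) :=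
  let n : Int := distances.length
  match PySem.List.pyGet? distances 0 with
  | none => []                 -- Python raises (distances[0] on empty list)
  | some row0 =>
    let m : Int := row0.length
    let visited := List.replicate distances.length (List.replicate row0.length false)
    let start := (PySem.Int.floordiv n 2, PySem.Int.floordiv m 2)
    loopA n m distances visited [(0, start.1, start.2)]

-- ===== PORT B =====
def spiral_explore_alt (distances : List (List Int)) : List (List Bool) :=
  match PySem.List.pyGet? distances 0 with
  | none => []                 -- Python raises (distances[0] on empty list)
  | some row0 => distances.map (fun _ => List.replicate row0.length true)

-- ===== PRECONDITION & SPEC =====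
-- A raises IndexError unless the grid is non-empty with a non-empty first row and
-- no row shorter than the first row (cells distances[i][j], j < len(distances[0]), are all read).
def Pre_spiral_explore (distances : List (List Int)) : Prop :=
  distances ≠ [] ∧ (distances.headD []) ≠ [] ∧
    ∀ row ∈ distances, (distances.headD []).length ≤ row.length

instance (distances : List (List Int)) : Decidable (Pre_spiral_explore distances) := by
  unfold Pre_spiral_explore; infer_instance

def pvWitness_spiral_explore : List (List Int) := [[1, 2], [3, 4]]

def Spec_spiral_explore (distances : List (List Int)) (out : List (List Bool)) : Prop :=
  out = spiral_explore_alt distances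

instance (distances : List (List Int)) (out : List (List Bool)) : Decidable (Spec_spiral_explore distances out) := by
  unfold Spec_spiral_explore; infer_instance

-- ===== CLAIM (what is proved, stated in full; the proofs are below) =====
def Claim_equal_spiral_explore : Prop := ∀ (distances : List (List Int)), Dom_spiral_explore distances → Pre_spiral_explore distances → Spec_spiral_explore distances (spiral_explore distances)


-- proof-only notions: grid shape, "cell is marked True", "coordinate is queued", adjacency
def ShapeVM (N M : Nat) (v : List (List Bool)) : Prop :=
  v.length = N ∧ ∀ r ∈ v, r.length = M

def TCell (v : List (List Bool)) (i k : Nat) : Prop :=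
  ∃ r, v[i]? = some r ∧ r[k]? = some true

def CQ (q : List (Int × Int × Int)) (i k : Nat) : Prop :=
  ∃ t ∈ q, t.2.1 = (i : Int) ∧ t.2.2 = (k : Int)

def AdjN (i k i' k' : Nat) : Prop :=
  (i' = i + 1 ∧ k' = k) ∨ (i = i' + 1 ∧ k' = k) ∨ (i' = i ∧ k' = k + 1) ∨ (i' = i ∧ k = k' + 1)

def InvA (N M : Nat) (v : List (List Bool)) (q : List (Int × Int × Int)) : Prop :=
  ShapeVM N M v ∧
  (∀ t ∈ q, 0 ≤ t.2.1 ∧ t.2.1 < (N : Int) ∧ 0 ≤ t.2.2 ∧ t.2.2 < (M : Int)) ∧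
  (∀ i k, i < N → k < M → TCell v i k →
    ∀ i' k', i' < N → k' < M → AdjN i k i' k' → TCell v i' k' ∨ CQ q i' k') ∧
  (TCell v (N / 2) (M / 2) ∨ CQ q (N / 2) (M / 2))

-- grid connectivity: a True-closed set containing the center is everything
theorem conn (N M : Nat) (hN : 0 < N) (hM : 0 < M) (v : List (List Bool))
    (hstart : TCell v (N / 2) (M / 2))
    (hcl : ∀ i k, i < N → k < M → TCell v i k →
      ∀ i' k', i' < N → k' < M → AdjN i k i' k' → TCell v i' k') :
    ∀ i k, i < N → k < M → TCell v i k := by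
  suffices h : ∀ D i k, i < N → k < M →
      ((i : Int) - (N / 2 : Nat)).natAbs + ((k : Int) - (M / 2 : Nat)).natAbs = D → TCell v i k by
    intro i k hi hk
    exact h _ i k hi hk rfl
  intro D
  induction D using Nat.strong_induction_on with
  | _ D IH =>
    intro i k hi hk hD
    by_cases hic : i = N / 2
    · by_cases hkc : k = M / 2
      · subst hic; subst hkc; exact hstart
      · rcases Nat.lt_or_ge k (M / 2) with hlt | hge
        · -- step from k+1 (closer to center) down to k
          have hk1 : k + 1 < M := by omega
          have hprev : TCell v i (k + 1) := IH _ (by subst hic; omega) i (k + 1) hi hk1 rfl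
          exact hcl i (k + 1) hi hk1 hprev i k hi hk (by unfold AdjN; omega)
        · have hk1 : k - 1 < M := by omega
          have hprev : TCell v i (k - 1) := IH _ (by subst hic; omega) i (k - 1) hi hk1 rfl
          exact hcl i (k - 1) hi hk1 hprev i k hi hk (by unfold AdjN; omega)
    · rcases Nat.lt_or_ge i (N / 2) with hlt | hge
      · have hi1 : i + 1 < N := by omega
        have hprev : TCell v (i + 1) k := IH _ (by omega) (i + 1) k hi1 hk rfl
        exact hcl (i + 1) k hi1 hk hprev i k hi hk (by unfold AdjN; omega)
      · have hi1 : i - 1 < N := by omega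
        have hprev : TCell v (i - 1) k := IH _ (by omega) (i - 1) k hi1 hk rfl
        exact hcl (i - 1) k hi1 hk hprev i k hi hk (by unfold AdjN; omega)

-- reading a cell at in-range nonnegative coordinates
theorem pyGet2_nonneg {α : Type} (v : List (List α)) (x y : Int) (hx : 0 ≤ x) (hy : 0 ≤ y) :
    pyGet2 v x y = (v[x.toNat]?).bind fun r => r[y.toNat]? := by
  unfold pyGet2
  rw [PySem.List.pyGet?_of_nonneg _ hx]
  cases v[x.toNat]? with
  | none => simp
  | some r => simp [PySem.List.pyGet?_of_nonneg _ hy]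

theorem pySet2_eq (v : List (List Bool)) (x y : Int) (hx : 0 ≤ x) (hy : 0 ≤ y)
    (r : List Bool) (hr : v[x.toNat]? = some r) :
    pySet2 v x y = v.set x.toNat (r.set y.toNat true) := by
  unfold pySet2
  have h1 : PySem.List.pyGetD v x [] = r := by
    unfold PySem.List.pyGetD
    rw [PySem.List.pyGet?_of_nonneg _ hx, hr]; rfl
  rw [h1, PySem.List.pySetD_of_nonneg r true hy, PySem.List.pySetD_of_nonneg v (r.set y.toNat true) hx]

theorem shape_set (N M : Nat) (v : List (List Bool)) (hs : ShapeVM N M v)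
    (j : Nat) (r : List Bool) (hr : r.length = M) : ShapeVM N M (v.set j r) := by
  obtain ⟨h1, h2⟩ := hs
  refine ⟨by simpa using h1, ?_⟩
  intro r' hr'
  rcases List.mem_or_eq_of_mem_set hr' with h | h
  · exact h2 r' h
  · subst h; exact hr

theorem tcell_set_self (v : List (List Bool)) (j k : Nat) (r : List Bool)
    (hj : v[j]? = some r) (hk : k < r.length) : TCell (v.set j (r.set k true)) j k := by
  have hjl : j < v.length := by
    by_contra h
    rw [List.getElem?_eq_none (by omega)] at hj
    simp at hj
  refine ⟨r.set k true, ?_, ?_⟩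
  · rw [List.getElem?_set_self (by omega)]
  · rw [List.getElem?_set_self (by simpa using hk)]

theorem tcell_set_mono (v : List (List Bool)) (j k : Nat) (r : List Bool)
    (hj : v[j]? = some r) (i k0 : Nat) (h : TCell v i k0) :
    TCell (v.set j (r.set k true)) i k0 := by
  obtain ⟨r0, h1, h2⟩ := h
  by_cases hij : i = j
  · subst hij
    rw [hj] at h1
    injection h1 with h1; subst h1
    refine ⟨r.set k true, ?_, ?_⟩
    · have : i < v.length := by
        by_contra h
        rw [List.getElem?_eq_none (by omega)] at hj
        simp at hj
      rw [List.getElem?_set_self (by omega)]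
    · by_cases hkk : k0 = k
      · subst hkk
        have : k0 < r.length := by
          by_contra h
          rw [List.getElem?_eq_none (by omega)] at h2
          simp at h2
        rw [List.getElem?_set_self (by omega)]
      · rw [List.getElem?_set_ne (by omega)]; exact h2
  · exact ⟨r0, by rw [List.getElem?_set_ne (by omega)]; exact h1, h2⟩

-- generic facts about the neighbor-push fold
theorem foldl_push_mono {β : Type} (f : List β → (Int × Int) → List β)
    (hf : ∀ acc p t, t ∈ acc → t ∈ f acc p) :
    ∀ (ps : List (Int × Int)) (acc : List β) (t : β), t ∈ acc → t ∈ ps.foldl f acc := by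
  intro ps
  induction ps with
  | nil => intro acc t h; simpa using h
  | cons p ps ih => intro acc t h; exact ih (f acc p) t (hf acc p t h)

theorem foldl_push_reach {β : Type} (f : List β → (Int × Int) → List β)
    (hf : ∀ acc p t, t ∈ acc → t ∈ f acc p)
    (ps : List (Int × Int)) (p : Int × Int) (hp : p ∈ ps) (t : β)
    (ht : ∀ acc, t ∈ f acc p) :
    ∀ acc, t ∈ ps.foldl f acc := by
  induction ps with
  | nil => simp at hp
  | cons q qs ih =>
    intro acc
    rcases List.mem_cons.mp hp with h | h
    · subst h
      exact foldl_push_mono f hf qs (f acc p) t (ht acc)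
    · exact ih h (f acc q)

theorem foldl_push_sound {β : Type} (f : List β → (Int × Int) → List β) (Q : β → Prop)
    (hf : ∀ acc p t, t ∈ f acc p → t ∈ acc ∨ Q t) :
    ∀ (ps : List (Int × Int)) (acc : List β) (t : β), t ∈ ps.foldl f acc → t ∈ acc ∨ Q t := by
  intro ps
  induction ps with
  | nil => intro acc t h; exact Or.inl (by simpa using h)
  | cons p ps ih =>
    intro acc t h
    rcases ih (f acc p) t h with h2 | h2
    · exact hf acc p t h2
    · exact Or.inr h2

-- inverse of tcell_set_mono: where can a True cell of the updated grid come from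
theorem tcell_set_inv (v : List (List Bool)) (j k : Nat) (r : List Bool)
    (hj : v[j]? = some r) (i0 k0 : Nat) (h : TCell (v.set j (r.set k true)) i0 k0) :
    TCell v i0 k0 ∨ (i0 = j ∧ k0 = k) := by
  obtain ⟨r0, h1, h2⟩ := h
  have hjl : j < v.length := by
    by_contra hc
    rw [List.getElem?_eq_none (by omega)] at hj
    simp at hj
  by_cases hij : i0 = j
  · subst hij
    rw [List.getElem?_set_self (by omega)] at h1
    injection h1 with h1
    by_cases hkk : k0 = k
    · exact Or.inr ⟨rfl, hkk⟩
    · subst h1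
      rw [List.getElem?_set_ne (by omega)] at h2
      exact Or.inl ⟨r, hj, h2⟩
  · rw [List.getElem?_set_ne (by omega)] at h1
    exact Or.inl ⟨r0, h1, h2⟩

def pushF (n m : Int) (distances : List (List Int)) (d : Int) :
    List (Int × Int × Int) → (Int × Int) → List (Int × Int × Int) :=
  fun acc p =>
    if 0 ≤ p.1 ∧ p.1 < n ∧ 0 ≤ p.2 ∧ p.2 < m then
      match pyGet2 distances p.1 p.2 with
      | some w => acc ++ [(d + w, p.1, p.2)]
      | none => acc
    else acc

theorem loopA_correct (distances : List (List Int)) (N M : Nat) (hN : 0 < N) (hM : 0 < M)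
    (hlen : distances.length = N) (hrows : ∀ r ∈ distances, M ≤ r.length) :
    ∀ (v : List (List Bool)) (q : List (Int × Int × Int)), InvA N M v q →
      ShapeVM N M (loopA (N : Int) (M : Int) distances v q) ∧
      ∀ i k, i < N → k < M → TCell (loopA (N : Int) (M : Int) distances v q) i k := by
  intro v q
  induction v, q using loopA.induct (N : Int) (M : Int) distances with
  | case1 v q hq =>
    intro hInv
    obtain ⟨hs, hrange, hcl, hstart⟩ := hInv
    have hqnil : q = [] := popMin_none q hq
    subst hqnil
    rw [loopA]
    refine ⟨hs, ?_⟩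
    apply conn N M hN hM v
    · rcases hstart with h | h
      · exact h
      · obtain ⟨t, ht, _⟩ := h; simp at ht
    · intro i k hi hk h i' k' hi' hk' hadj
      rcases hcl i k hi hk h i' k' hi' hk' hadj with h2 | h2
      · exact h2
      · obtain ⟨t, ht, _⟩ := h2; simp at ht
  | case2 v q d x y q' hq hv =>
    intro hInv
    obtain ⟨⟨hsl, hsr⟩, hrange, hcl, hstart⟩ := hInv
    -- the popped coordinate is in range, so the read cannot fail: contradiction with hv
    have hmem : (d, x, y) ∈ q := (popMin_perm q _ _ hq).symm.subset (List.mem_cons_self)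
    obtain ⟨hx0, hxN, hy0, hyM⟩ := hrange _ hmem
    dsimp only at hx0 hxN hy0 hyM
    exfalso
    have hiN : x.toNat < v.length := by omega
    have hr : v[x.toNat]? = some v[x.toNat] := List.getElem?_eq_getElem hiN
    have hrM : v[x.toNat].length = M := hsr _ (List.getElem_mem hiN)
    have hkM : y.toNat < v[x.toNat].length := by omega
    rw [pyGet2_nonneg v x y hx0 hy0, hr] at hv
    simp only [Option.bind_some] at hv
    rw [List.getElem?_eq_getElem hkM] at hv
    simp at hv
  | case3 v q d x y q' hq hv ih =>
    intro hInv
    obtain ⟨⟨hsl, hsr⟩, hrange, hcl, hstart⟩ := hInv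
    have hperm := popMin_perm q _ _ hq
    have hsub : q' ⊆ q := fun t ht => hperm.symm.subset (List.mem_cons_of_mem _ ht)
    obtain ⟨hx0, hxN, hy0, hyM⟩ := hrange _ (hperm.symm.subset List.mem_cons_self)
    dsimp only at hx0 hxN hy0 hyM
    -- the popped cell is already True
    have hT : TCell v x.toNat y.toNat := by
      rw [pyGet2_nonneg v x y hx0 hy0] at hv
      cases hrow : v[x.toNat]? with
      | none => rw [hrow] at hv; simp at hv
      | some r => rw [hrow] at hv; exact ⟨r, hrow, by simpa using hv⟩
    have hCQ : ∀ i' k', CQ q i' k' → TCell v i' k' ∨ CQ q' i' k' := by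
      intro i' k' ⟨t, ht, h1, h2⟩
      rcases List.mem_cons.mp (hperm.subset ht) with h | h
      · subst h
        simp only at h1 h2
        have : i' = x.toNat ∧ k' = y.toNat := by omega
        obtain ⟨e1, e2⟩ := this; subst e1; subst e2
        exact Or.inl hT
      · exact Or.inr ⟨t, h, h1, h2⟩
    rw [loopA, hq]
    dsimp only
    rw [hv]
    apply ih
    refine ⟨⟨hsl, hsr⟩, fun t ht => hrange t (hsub ht), ?_, ?_⟩
    · intro i k hi hk h i' k' hi' hk' hadj
      rcases hcl i k hi hk h i' k' hi' hk' hadj with h2 | h2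
      · exact Or.inl h2
      · exact hCQ i' k' h2
    · rcases hstart with h | h
      · exact Or.inl h
      · exact hCQ _ _ h
  | case4 v q d x y q' hq hv vset qnew ih =>
    intro hInv
    obtain ⟨⟨hsl, hsr⟩, hrange, hcl, hstart⟩ := hInv
    have hperm := popMin_perm q _ _ hq
    have hsub : q' ⊆ q := fun t ht => hperm.symm.subset (List.mem_cons_of_mem _ ht)
    obtain ⟨hx0, hxN, hy0, hyM⟩ := hrange _ (hperm.symm.subset List.mem_cons_self)
    dsimp only at hx0 hxN hy0 hyM
    have hiN : x.toNat < v.length := by omega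
    have hr : v[x.toNat]? = some v[x.toNat] := List.getElem?_eq_getElem hiN
    set r : List Bool := v[x.toNat] with hrdef
    have hrM : r.length = M := hsr _ (List.getElem_mem hiN)
    have hkM : y.toNat < r.length := by omega
    -- the updated grid
    have hset : pySet2 v x y = v.set x.toNat (r.set y.toNat true) := pySet2_eq v x y hx0 hy0 r hr
    have hvt' : TCell (v.set x.toNat (r.set y.toNat true)) x.toNat y.toNat :=
      tcell_set_self v x.toNat y.toNat r hr hkM
    have hmono := tcell_set_mono v x.toNat y.toNat r hr
    have hCQ : ∀ i' k', CQ q i' k' → (i' = x.toNat ∧ k' = y.toNat) ∨ CQ q' i' k' := by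
      intro i' k' hcq
      obtain ⟨t, ht, h1, h2⟩ := hcq
      rcases List.mem_cons.mp (hperm.subset ht) with h | h
      · subst h; dsimp only at h1 h2; left; omega
      · exact Or.inr ⟨t, h, h1, h2⟩
    have hfmono : ∀ acc p t, t ∈ acc → t ∈ pushF (N : Int) (M : Int) distances d acc p := by
      intro acc p t ht
      unfold pushF
      split
      · cases pyGet2 distances p.1 p.2 <;> simp [ht]
      · exact ht
    have hfsound : ∀ acc p t, t ∈ pushF (N : Int) (M : Int) distances d acc p →
        t ∈ acc ∨ (0 ≤ t.2.1 ∧ t.2.1 < (N : Int) ∧ 0 ≤ t.2.2 ∧ t.2.2 < (M : Int)) := by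
      intro acc p t ht
      unfold pushF at ht
      split at ht
      · rename_i hcond
        cases hlook : pyGet2 distances p.1 p.2 with
        | none => rw [hlook] at ht; exact Or.inl ht
        | some w =>
          rw [hlook] at ht
          rcases List.mem_append.mp ht with h | h
          · exact Or.inl h
          · simp only [List.mem_singleton] at h
            subst h
            exact Or.inr (by dsimp only; omega)
      · exact Or.inl ht
    have hlookup : ∀ p : Int × Int, 0 ≤ p.1 → p.1 < (N : Int) → 0 ≤ p.2 → p.2 < (M : Int) →
        ∃ w, pyGet2 distances p.1 p.2 = some w := by
      intro p h1 h2 h3 h4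
      have hp1 : p.1.toNat < distances.length := by omega
      have hd : distances[p.1.toNat]? = some distances[p.1.toNat] := List.getElem?_eq_getElem hp1
      have hlen2 : M ≤ distances[p.1.toNat].length := hrows _ (List.getElem_mem hp1)
      have hp2 : p.2.toNat < distances[p.1.toNat].length := by omega
      refine ⟨distances[p.1.toNat][p.2.toNat], ?_⟩
      rw [pyGet2_nonneg _ _ _ h1 h3, hd]
      simp [List.getElem?_eq_getElem hp2]
    have hpush : ∀ p ∈ [(x+1,y),(x-1,y),(x,y+1),(x,y-1)], ∀ i' k' : Nat,
        p.1 = (i' : Int) → p.2 = (k' : Int) → i' < N → k' < M →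
        CQ (List.foldl (pushF (N : Int) (M : Int) distances d) q'
          [(x+1,y),(x-1,y),(x,y+1),(x,y-1)]) i' k' := by
      intro p hp i' k' h1 h2 hi' hk'
      have hc1 : (0 : Int) ≤ p.1 := by omega
      have hc2 : p.1 < (N : Int) := by omega
      have hc3 : (0 : Int) ≤ p.2 := by omega
      have hc4 : p.2 < (M : Int) := by omega
      obtain ⟨w, hw⟩ := hlookup p hc1 hc2 hc3 hc4
      refine ⟨(d + w, p.1, p.2), ?_, h1, h2⟩
      apply foldl_push_reach _ hfmono _ p hp
      intro acc
      unfold pushF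
      rw [if_pos ⟨hc1, hc2, hc3, hc4⟩, hw]
      simp
    have hCQmono : ∀ i' k', CQ q' i' k' →
        CQ (List.foldl (pushF (N : Int) (M : Int) distances d) q'
          [(x+1,y),(x-1,y),(x,y+1),(x,y-1)]) i' k' := by
      intro i' k' hcq
      obtain ⟨t, ht, h1, h2⟩ := hcq
      exact ⟨t, foldl_push_mono _ hfmono _ q' t ht, h1, h2⟩
    rw [loopA, hq]
    dsimp only
    rw [hv]
    dsimp only
    apply ih
    show InvA N M (pySet2 v x y)
      (List.foldl (pushF (N : Int) (M : Int) distances d) q' [(x+1,y),(x-1,y),(x,y+1),(x,y-1)])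
    rw [hset]
    refine ⟨shape_set N M v ⟨hsl, hsr⟩ _ _ (by simpa using hrM), ?_, ?_, ?_⟩
    · intro t ht
      rcases foldl_push_sound _ _ hfsound _ q' t ht with h | h
      · exact hrange t (hsub h)
      · exact h
    · intro i0 k0 hi0 hk0 hT0 i' k' hi' hk' hadj
      rcases tcell_set_inv v x.toNat y.toNat r hr i0 k0 hT0 with hold | ⟨e1, e2⟩
      · rcases hcl i0 k0 hi0 hk0 hold i' k' hi' hk' hadj with h2 | h2
        · exact Or.inl (hmono i' k' h2)
        · rcases hCQ i' k' h2 with ⟨e1, e2⟩ | h3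
          · subst e1; subst e2; exact Or.inl hvt'
          · exact Or.inr (hCQmono _ _ h3)
      · subst e1; subst e2
        apply Or.inr
        unfold AdjN at hadj
        rcases hadj with ⟨e, e'⟩ | ⟨e, e'⟩ | ⟨e, e'⟩ | ⟨e, e'⟩
        · exact hpush (x+1, y) (by simp) i' k' (by dsimp only; omega) (by dsimp only; omega) hi' hk'
        · exact hpush (x-1, y) (by simp) i' k' (by dsimp only; omega) (by dsimp only; omega) hi' hk'
        · exact hpush (x, y+1) (by simp) i' k' (by dsimp only; omega) (by dsimp only; omega) hi' hk'
        · exact hpush (x, y-1) (by simp) i' k' (by dsimp only; omega) (by dsimp only; omega) hi' hk'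
    · rcases hstart with h | h
      · exact Or.inl (hmono _ _ h)
      · rcases hCQ _ _ h with ⟨e1, e2⟩ | h3
        · exact Or.inl (by rw [e1, e2]; exact hvt')
        · exact Or.inr (hCQmono _ _ h3)

theorem tcell_replicate_false (N M i k : Nat) :
    ¬ TCell (List.replicate N (List.replicate M false)) i k := by
  intro h
  obtain ⟨r, h1, h2⟩ := h
  rw [List.getElem?_replicate] at h1
  split at h1
  · injection h1 with h1
    subst h1
    rw [List.getElem?_replicate] at h2
    split at h2 <;> simp at h2
  · simp at h1

-- ===== VERDICT (by name: the statement is the Claim_ definition above) =====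
theorem spiral_explore_spec : Claim_equal_spiral_explore := by
  unfold Claim_equal_spiral_explore
  intro d hDom hPre
  obtain ⟨hne, hhead, hrows0⟩ := hPre
  unfold Spec_spiral_explore
  cases d with
  | nil => exact absurd rfl hne
  | cons r0 rest =>
    simp only [List.headD_cons] at hhead hrows0
    unfold spiral_explore spiral_explore_alt
    rw [PySem.List.pyGet?_zero_cons]
    dsimp only
    set N := (r0 :: rest).length with hNdef
    set M := r0.length with hMdef
    have hN : 0 < N := by simp [hNdef]
    have hM : 0 < M := by
      cases r0 with
      | nil => exact absurd rfl hhead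
      | cons a l => simp [hMdef]
    have hsx : PySem.Int.floordiv (N : Int) 2 = ((N / 2 : Nat) : Int) := by
      exact_mod_cast PySem.Int.floordiv_natCast N 2
    have hsy : PySem.Int.floordiv (M : Int) 2 = ((M / 2 : Nat) : Int) := by
      exact_mod_cast PySem.Int.floordiv_natCast M 2
    rw [hsx, hsy]
    have hInv : InvA N M (List.replicate N (List.replicate M false))
        [(0, ((N / 2 : Nat) : Int), ((M / 2 : Nat) : Int))] := by
      refine ⟨⟨by simp, ?_⟩, ?_, ?_, ?_⟩
      · intro r hr
        rw [List.eq_of_mem_replicate hr]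
        simp
      · intro t ht
        simp only [List.mem_singleton] at ht
        subst ht
        refine ⟨by positivity, ?_, by positivity, ?_⟩ <;> dsimp only <;>
          · rw [Int.ofNat_lt]; omega
      · intro i k hi hk h
        exact absurd h (tcell_replicate_false N M i k)
      · exact Or.inr ⟨(0, ((N / 2 : Nat) : Int), ((M / 2 : Nat) : Int)), by simp, rfl, rfl⟩
    obtain ⟨⟨hlenR, hrowR⟩, hall⟩ :=
      loopA_correct (r0 :: rest) N M hN hM rfl (fun r hr => hrows0 r hr)
        (List.replicate N (List.replicate M false))
        [(0, ((N / 2 : Nat) : Int), ((M / 2 : Nat) : Int))] hInv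
    set R := loopA (N : Int) (M : Int) (r0 :: rest)
      (List.replicate N (List.replicate M false))
      [(0, ((N / 2 : Nat) : Int), ((M / 2 : Nat) : Int))] with hRdef
    have hmap : (r0 :: rest).map (fun _ => List.replicate M true) =
        List.replicate N (List.replicate M true) := by
      rw [List.map_const']
    rw [hmap]
    apply List.ext_getElem (by simp [hlenR])
    intro i h1 h2
    have hiN : i < N := by omega
    have hrowlen : R[i].length = M := hrowR _ (List.getElem_mem h1)
    apply List.ext_getElem (by simp [hrowlen])
    intro k hh1 hh2
    have hkM : k < M := by omega
    obtain ⟨r, hr1, hr2⟩ := hall i k hiN hkM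
    have hRi : R[i]? = some R[i] := List.getElem?_eq_getElem h1
    rw [hRi] at hr1
    injection hr1 with hr1
    subst hr1
    have hRk : R[i][k]? = some (R[i][k]'hh1) := List.getElem?_eq_getElem hh1
    rw [hRk] at hr2
    injection hr2 with hr2
    rw [hr2]
    simp
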